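-- pv_equiv track=rewrite | github.com/martingiguere/hakko-203-firmware-video | verify_ff_transitions.py | detect_noise_clusters
-- ===== SOURCE A (Python) =====
-- def detect_noise_clusters(transitions):
--     """Detect rapid back-and-forth transitions (within 0x30) as noise clusters."""
--     if not transitions:
--         return []
--
--     clusters = []
--     current_cluster = [transitions[0]]
--
--     for t in transitions[1:]:
--         prev = current_cluster[-1]
--         if t['addr_after'] - prev['addr_before'] <= 0x30:
--             current_cluster.append(t)
--         else:
--             if len(current_cluster) >= 2:
--                 clusters.append(current_cluster)
--             current_cluster = [t]
--
--     if len(current_cluster) >= 2: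
--         clusters.append(current_cluster)
--
--     return clusters
-- ===== SOURCE B (Python) =====
-- def _run_end(transitions, n, j):
--     """Advance j past the maximal chain of consecutive near transitions."""
--     while j < n and transitions[j]['addr_after'] - transitions[j - 1]['addr_before'] <= 0x30:
--         j += 1
--     return j
--
--
-- def detect_noise_clusters(transitions):
--     """Detect rapid back-and-forth transitions (within 0x30) as noise clusters."""
--     n = len(transitions)
--     clusters = []
--     i = 0
--     while i < n:
--         j = _run_end(transitions, n, i + 1)
--         if j - i >= 2:
--             clusters.append(transitions[i:j])
--         i = j
--     return clusters
-- ===== Notes on version B (the rewrite author's own statement) =====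
-- stated objective: alternative
-- what changed: Replaces A's single fold carrying a (clusters, current_cluster) accumulator pair by a two-level index scan: an inner helper advances j to the end of each maximal chain of near transitions, and the outer loop slices transitions[i:j] out and keeps it iff its length is >= 2.
import Mathlib
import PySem

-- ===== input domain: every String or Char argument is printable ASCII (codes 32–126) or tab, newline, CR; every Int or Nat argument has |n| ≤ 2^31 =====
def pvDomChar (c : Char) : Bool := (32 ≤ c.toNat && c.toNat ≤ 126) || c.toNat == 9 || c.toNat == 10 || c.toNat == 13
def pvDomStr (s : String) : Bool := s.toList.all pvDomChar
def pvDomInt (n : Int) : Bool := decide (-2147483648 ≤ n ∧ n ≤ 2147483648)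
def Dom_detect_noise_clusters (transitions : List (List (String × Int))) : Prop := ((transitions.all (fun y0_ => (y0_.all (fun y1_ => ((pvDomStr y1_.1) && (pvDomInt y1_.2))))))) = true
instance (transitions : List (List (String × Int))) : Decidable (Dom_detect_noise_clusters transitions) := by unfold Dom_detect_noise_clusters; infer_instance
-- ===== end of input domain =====

-- B replaces A's accumulator fold by a two-level index scan: an inner helper finds the end of each
-- maximal chain of near transitions, the outer loop slices the run out and keeps it iff its length ≥ 2
-- (objective: alternative decomposition, same cost).


-- d[k] on the association list (first match); Pre_ guarantees the key is present, so getD 0 is never hit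
def pvGetKey (d : List (String × Int)) (k : String) : Int :=
  (((d.find? (fun p => p.1 == k)).map Prod.snd).getD 0)

-- ===== PORT A =====
-- one iteration of A's for-loop: state = (clusters, current_cluster)
def pvStepA (st : List (List (List (String × Int))) × List (List (String × Int)))
    (t : List (String × Int)) :
    List (List (List (String × Int))) × List (List (String × Int)) :=
  let prev := st.2.getLastD []
  if pvGetKey t "addr_after" - pvGetKey prev "addr_before" ≤ 48 then
    (st.1, st.2 ++ [t])
  else if 2 ≤ st.2.length then (st.1 ++ [st.2], [t]) else (st.1, [t])

def detect_noise_clusters (transitions : List (List (String × Int))) : List (List (List (String × Int))) :=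
  match transitions with
  | [] => []
  | t0 :: rest =>
    let st := rest.foldl pvStepA ([], [t0])
    if 2 ≤ st.2.length then st.1 ++ [st.2] else st.1

-- ===== PORT B =====
-- _run_end: advance j while consecutive transitions stay within 0x30
def pvRunEnd (ts : List (List (String × Int))) (n j : Nat) : Nat :=
  if _ : j < n then
    if pvGetKey ((PySem.List.pyGet? ts (j : Int)).getD []) "addr_after"
        - pvGetKey ((PySem.List.pyGet? ts ((j : Int) - 1)).getD []) "addr_before" ≤ 48 then
      pvRunEnd ts n (j + 1)
    else j
  else j
termination_by n - j

theorem le_pvRunEnd_aux (k : Nat) : ∀ (ts : List (List (String × Int))) (n j : Nat),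
    n - j ≤ k → j ≤ pvRunEnd ts n j := by
  induction k with
  | zero =>
    intro ts n j hk
    rw [pvRunEnd]
    split
    · omega
    · exact le_refl _
  | succ k ih =>
    intro ts n j hk
    rw [pvRunEnd]
    split
    · split
      · have := ih ts n (j + 1) (by omega); omega
      · exact le_refl _
    · exact le_refl _

theorem le_pvRunEnd (ts : List (List (String × Int))) (n j : Nat) : j ≤ pvRunEnd ts n j :=
  le_pvRunEnd_aux (n - j) ts n j (le_refl _)

-- B's outer while-loop over the start index i, accumulating clusters
def pvScanB (ts : List (List (String × Int))) (n i : Nat)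
    (clusters : List (List (List (String × Int)))) : List (List (List (String × Int))) :=
  if _ : i < n then
    let j := pvRunEnd ts n (i + 1)
    pvScanB ts n j
      (if 2 ≤ j - i then clusters ++ [PySem.List.slice ts (some (i : Int)) (some (j : Int))] else clusters)
  else clusters
termination_by n - i
decreasing_by
  have := le_pvRunEnd ts n (i + 1); omega

def detect_noise_clusters_alt (transitions : List (List (String × Int))) : List (List (List (String × Int))) :=
  pvScanB transitions transitions.length 0 []

-- ===== PRECONDITION & SPEC =====
-- Pre_ excludes exactly the inputs on which A raises KeyError: some consecutive pair where the later
-- element lacks 'addr_after' or the earlier one lacks 'addr_before'.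
def Pre_detect_noise_clusters (transitions : List (List (String × Int))) : Prop :=
  ∀ pr ∈ transitions.zip transitions.tail,
    (pr.2.any (fun p => p.1 == "addr_after")) = true ∧ (pr.1.any (fun p => p.1 == "addr_before")) = true

instance (transitions : List (List (String × Int))) : Decidable (Pre_detect_noise_clusters transitions) := by
  unfold Pre_detect_noise_clusters; infer_instance

def pvWitness_detect_noise_clusters : (List (List (String × Int))) :=
  [[("addr_before", 10), ("addr_after", 12)], [("addr_before", 20), ("addr_after", 30)],
   [("addr_before", 200), ("addr_after", 210)]]

def Spec_detect_noise_clusters (transitions : List (List (String × Int))) (out : List (List (List (String × Int)))) : Prop := out = detect_noise_clusters_alt transitions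
instance (transitions : List (List (String × Int))) (out : List (List (List (String × Int)))) : Decidable (Spec_detect_noise_clusters transitions out) := by unfold Spec_detect_noise_clusters; infer_instance

-- ===== CLAIM (what is proved, stated in full; the proofs are below) =====
def Claim_equal_detect_noise_clusters : Prop := ∀ (transitions : List (List (String × Int))), Dom_detect_noise_clusters transitions → Pre_detect_noise_clusters transitions → Spec_detect_noise_clusters transitions (detect_noise_clusters transitions)

-- ===== LEMMAS AND PROOFS =====

-- reference shape both ports are reduced to: split off the maximal chain, keep it iff length >= 2
def pvSplit (p : List (String × Int)) (rest : List (List (String × Int))) :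
    List (List (String × Int)) × List (List (String × Int)) :=
  match rest with
  | [] => ([], [])
  | t :: ts =>
    if pvGetKey t "addr_after" - pvGetKey p "addr_before" ≤ 48 then
      let r := pvSplit t ts; (t :: r.1, r.2)
    else ([], t :: ts)

theorem pvSplit_append (p : List (String × Int)) (rest : List (List (String × Int))) :
    (pvSplit p rest).1 ++ (pvSplit p rest).2 = rest := by
  induction rest generalizing p with
  | nil => simp [pvSplit]
  | cons t ts ih => simp only [pvSplit]; split <;> simp [ih]

theorem pvSplit_snd_length_le (p : List (String × Int)) (rest : List (List (String × Int))) :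
    (pvSplit p rest).2.length ≤ rest.length := by
  have h := pvSplit_append p rest
  have := congrArg List.length h
  simp only [List.length_append] at this; omega

def pvAltL : List (List (String × Int)) → List (List (List (String × Int)))
  | [] => []
  | t :: rest =>
    (if 2 ≤ (t :: (pvSplit t rest).1).length then [t :: (pvSplit t rest).1] else [])
      ++ pvAltL (pvSplit t rest).2
termination_by ts => ts.length
decreasing_by
  have := pvSplit_snd_length_le t rest; simp; omega

theorem pvAltL_cons (t : List (String × Int)) (rest : List (List (String × Int))) :
    pvAltL (t :: rest)
      = (if 2 ≤ (t :: (pvSplit t rest).1).length then [t :: (pvSplit t rest).1] else [])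
        ++ pvAltL (pvSplit t rest).2 := by
  rw [pvAltL.eq_def]

theorem portA_fold_eq (rest : List (List (String × Int)))
    (clusters : List (List (List (String × Int)))) (cur : List (List (String × Int)))
    (p : List (String × Int)) (hp : cur.getLast?.getD [] = p) (hne : cur ≠ []) :
    (let st := rest.foldl pvStepA (clusters, cur)
     if 2 ≤ st.2.length then st.1 ++ [st.2] else st.1)
    = clusters
      ++ (if 2 ≤ (cur ++ (pvSplit p rest).1).length then [cur ++ (pvSplit p rest).1] else [])
      ++ pvAltL (pvSplit p rest).2 := by
  induction rest generalizing clusters cur p with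
  | nil =>
    simp only [List.foldl_nil, pvSplit, pvAltL, List.append_nil]
    split <;> simp
  | cons t ts ih =>
    simp only [List.foldl_cons, pvSplit]
    by_cases c : pvGetKey t "addr_after" - pvGetKey p "addr_before" ≤ 48
    · simp only [if_pos c]
      have hstep : pvStepA (clusters, cur) t = (clusters, cur ++ [t]) := by
        simp only [pvStepA, List.getLastD_eq_getLast?, hp, c, if_pos]
      rw [hstep, ih clusters (cur ++ [t]) t (by simp) (by simp)]
      rw [List.append_assoc cur [t]]
      simp
    · simp only [if_neg c]
      have hstep : pvStepA (clusters, cur) t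
          = ((if 2 ≤ cur.length then clusters ++ [cur] else clusters), [t]) := by
        simp only [pvStepA, List.getLastD_eq_getLast?, hp, c, if_false]
        split <;> rfl
      rw [hstep, ih _ [t] t (by simp) (by simp), pvAltL_cons]
      by_cases h2 : 2 ≤ cur.length <;> simp [h2, List.append_assoc]

theorem portA_eq_altL (ts : List (List (String × Int))) :
    detect_noise_clusters ts = pvAltL ts := by
  cases ts with
  | nil => simp [detect_noise_clusters, pvAltL]
  | cons t0 rest =>
    have h := portA_fold_eq rest [] [t0] t0 (by simp) (by simp)
    simp only [detect_noise_clusters]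
    rw [h, pvAltL_cons]
    simp

theorem pvRunEnd_eq (rest : List (List (String × Int))) :
    ∀ (pre : List (List (String × Int))) (p : List (String × Int)),
    pvRunEnd (pre ++ p :: rest) (pre ++ p :: rest).length (pre.length + 1)
      = pre.length + 1 + (pvSplit p rest).1.length := by
  induction rest with
  | nil =>
    intro pre p
    rw [pvRunEnd]
    simp [pvSplit]
  | cons t ts ih =>
    intro pre p
    have hlen : pre.length + 1 < (pre ++ p :: t :: ts).length := by simp
    have hj : PySem.List.pyGet? (pre ++ p :: t :: ts) ((pre.length + 1 : Nat) : Int) = some t := by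
      rw [PySem.List.pyGet?_natCast, List.getElem?_append_right (by omega)]
      simp
    have hj1 : PySem.List.pyGet? (pre ++ p :: t :: ts) (((pre.length + 1 : Nat) : Int) - 1) = some p := by
      have e : ((pre.length + 1 : Nat) : Int) - 1 = ((pre.length : Nat) : Int) := by push_cast; ring
      rw [e, PySem.List.pyGet?_natCast, List.getElem?_append_right (by omega)]
      simp
    rw [pvRunEnd]
    simp only [hlen, ↓reduceDIte, hj, hj1, Option.getD_some]
    by_cases c : pvGetKey t "addr_after" - pvGetKey p "addr_before" ≤ 48
    · simp only [c, if_pos]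
      have h := ih (pre ++ [p]) t
      rw [show (pre ++ [p]) ++ t :: ts = pre ++ p :: t :: ts by simp] at h
      rw [show (pre ++ [p]).length = pre.length + 1 by simp] at h
      rw [h]
      simp only [pvSplit, c, if_pos, List.length_cons]
      omega
    · simp [c, pvSplit]

theorem pvScanB_eq (k : Nat) : ∀ (rest : List (List (String × Int))), rest.length ≤ k →
    ∀ (pre : List (List (String × Int))) (clusters : List (List (List (String × Int)))),
    pvScanB (pre ++ rest) (pre ++ rest).length pre.length clusters = clusters ++ pvAltL rest := by
  induction k with
  | zero =>
    intro rest hk pre clusters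
    have : rest = [] := by cases rest <;> simp_all
    subst this
    rw [pvScanB]
    simp [pvAltL]
  | succ k ih =>
    intro rest hk pre clusters
    cases rest with
    | nil => rw [pvScanB]; simp [pvAltL]
    | cons t rest' =>
      have hlt : pre.length < (pre ++ t :: rest').length := by simp
      rw [pvScanB]
      simp only [hlt, ↓reduceDIte]
      have hre := pvRunEnd_eq rest' pre t
      have hsplit : (pvSplit t rest').1 ++ (pvSplit t rest').2 = rest' := pvSplit_append t rest'
      have hs2 : (pvSplit t rest').2.length ≤ rest'.length := pvSplit_snd_length_le t rest'
      have hslice : PySem.List.slice (pre ++ t :: rest') (some ((pre.length : Nat) : Int))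
          (some ((pre.length + 1 + (pvSplit t rest').1.length : Nat) : Int))
          = t :: (pvSplit t rest').1 := by
        rw [PySem.List.slice_natCast, List.drop_append_of_le_length (by omega), List.drop_length]
        simp only [List.nil_append]
        rw [show pre.length + 1 + (pvSplit t rest').1.length - pre.length
            = (pvSplit t rest').1.length + 1 by omega]
        rw [List.take_succ_cons]
        congr 1
        exact (List.prefix_iff_eq_take.mp ⟨_, hsplit⟩).symm
      rw [hre, hslice]
      have harr : pre ++ t :: rest' = (pre ++ t :: (pvSplit t rest').1) ++ (pvSplit t rest').2 := by
        conv_lhs => rw [← hsplit]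
        simp
      have hlen2 : (pre ++ t :: (pvSplit t rest').1).length
          = pre.length + 1 + (pvSplit t rest').1.length := by simp; omega
      have hcall := ih (pvSplit t rest').2 (by have := hs2; simp only [List.length_cons] at hk; omega) (pre ++ t :: (pvSplit t rest').1)
        (if 2 ≤ pre.length + 1 + (pvSplit t rest').1.length - pre.length then
          clusters ++ [t :: (pvSplit t rest').1] else clusters)
      rw [← harr, hlen2] at hcall
      rw [hcall, pvAltL_cons]
      by_cases h2 : 1 ≤ (pvSplit t rest').1.length
      · have e1 : 2 ≤ pre.length + 1 + (pvSplit t rest').1.length - pre.length := by omega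
        have e2 : 2 ≤ (t :: (pvSplit t rest').1).length := by
          simp only [List.length_cons]; omega
        rw [if_pos e1, if_pos e2]
        simp
      · have e1 : ¬ 2 ≤ pre.length + 1 + (pvSplit t rest').1.length - pre.length := by omega
        have e2 : ¬ 2 ≤ (t :: (pvSplit t rest').1).length := by
          simp only [List.length_cons]; omega
        rw [if_neg e1, if_neg e2]
        simp

theorem portB_eq_altL (ts : List (List (String × Int))) :
    detect_noise_clusters_alt ts = pvAltL ts := by
  have h := pvScanB_eq ts.length ts (le_refl _) [] []
  simpa [detect_noise_clusters_alt] using h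

-- ===== VERDICT (by name: the statement is the Claim_ definition above) =====
theorem detect_noise_clusters_spec : Claim_equal_detect_noise_clusters := by
  intro ts _ _
  unfold Spec_detect_noise_clusters
  rw [portA_eq_altL, portB_eq_altL]
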